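-- pv_equiv track=rewrite | github.com/MrBrantCode/unitest_baseline | mut_generate/mist_train_taco/taco_11043/solution.py | calculate_bst_liking
-- ===== SOURCE A (Python) =====
-- def calculate_bst_liking(N, alpha, beta, A):
--     MOD = 10 ** 9 + 9
--     bt = [1]
--     oe = [{}]
--
--     for i in range(1, N + 1):
--         c = 0
--         d = {}
--         for j in range(i):
--             l = bt[j]
--             r = bt[i - j - 1]
--             for (k, (e, o)) in oe[j].items():
--                 (de, do) = d.get(k, [0, 0])
--                 d[k] = [(de + o * r) % MOD, (do + e * r) % MOD]
--             for (k, (e, o)) in oe[i - j - 1].items():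
--                 (de, do) = d.get(k + j + 1, [0, 0])
--                 d[k + j + 1] = [(de + o * l) % MOD, (do + e * l) % MOD]
--             (de, do) = d.get(j, [0, 0])
--             d[j] = [(de + l * r) % MOD, do]
--             c += l * r % MOD
--         bt.append(c % MOD)
--         oe.append(d)
--
--     d = oe[N]
--     l = sorted(A)
--     e = o = 0
--     for (k, (de, do)) in d.items():
--         e += de * l[k] % MOD
--         o += do * l[k] % MOD
--     e %= MOD
--     o %= MOD
--
--     result = (e * alpha % MOD + (MOD - o * beta % MOD)) % MOD
--     return result
-- ===== SOURCE B (Python) =====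
-- def calculate_bst_liking(N, alpha, beta, A):
--     MOD = 10 ** 9 + 9
--     w = sorted(A)[:max(N, 0)]
--     n = len(w)
--     # BST counts per size (Catalan numbers mod MOD)
--     cnt = [1]
--     for m in range(1, n + 1):
--         cnt.append(sum(cnt[j] * cnt[m - 1 - j] for j in range(m)) % MOD)
--     # eo[m][lo] = (e, o): over all BSTs of the interval w[lo:lo+m], the sums of
--     # value * (#trees placing it at even depth) and * (#trees at odd depth)
--     eo = [[(0, 0)] * (n + 1)]
--     for m in range(1, n + 1):
--         row = []
--         for lo in range(n - m + 1):
--             e = o = 0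
--             for j in range(m):
--                 L = cnt[j]
--                 R = cnt[m - 1 - j]
--                 el, ol = eo[j][lo]
--                 er, od = eo[m - 1 - j][lo + j + 1]
--                 e = (e + L * R * w[lo + j] + ol * R + od * L) % MOD
--                 o = (o + el * R + er * L) % MOD
--             row.append((e, o))
--         eo.append(row)
--     e, o = eo[n][0]
--     return (e * alpha % MOD + (MOD - o * beta % MOD)) % MOD
-- ===== Notes on version B (the rewrite author's own statement) =====
-- stated objective: alternative
-- what changed: Replaced the size-indexed DP over dicts of per-position even/odd counts (positions shifted and re-merged dict-by-dict at every size) by an interval DP directly over the sorted values: for each interval [lo,lo+m) it keeps just two value-weighted scalars (even-sum, odd-sum) plus Catalan-mod counts, combining over the root with the parity swap, so no position dicts or key shifting exist at all.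
import Mathlib
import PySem

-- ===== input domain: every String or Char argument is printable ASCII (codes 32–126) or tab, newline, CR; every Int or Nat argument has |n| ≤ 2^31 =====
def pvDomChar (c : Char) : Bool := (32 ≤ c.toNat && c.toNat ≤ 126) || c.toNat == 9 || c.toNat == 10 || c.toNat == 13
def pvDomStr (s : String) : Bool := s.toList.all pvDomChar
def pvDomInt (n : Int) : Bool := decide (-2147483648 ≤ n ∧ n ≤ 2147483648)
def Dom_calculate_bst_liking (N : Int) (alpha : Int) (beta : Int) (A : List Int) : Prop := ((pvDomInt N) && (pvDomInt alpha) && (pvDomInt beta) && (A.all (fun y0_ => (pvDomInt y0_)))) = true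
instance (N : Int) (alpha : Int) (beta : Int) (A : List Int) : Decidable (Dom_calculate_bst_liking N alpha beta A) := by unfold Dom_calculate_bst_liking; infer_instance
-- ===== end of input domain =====

-- B replaces the size-indexed DP over dicts of per-position even/odd counts by an
-- interval DP over the sorted values keeping only two value-weighted sums per interval
-- (objective: alternative algorithm of similar cost).

-- ===== PORT A =====
def calculate_bst_liking (N : Int) (alpha : Int) (beta : Int) (A : List Int) : Int :=
  let M : Int := 10 ^ 9 + 9
  let st := (PySem.List.pyRange 1 (N + 1) 1).foldl
    (fun (st : List Int × List (PySem.Dict Int (Int × Int))) i =>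
      let bt := st.1
      let oe := st.2
      let cd := (PySem.List.pyRange 0 i 1).foldl
        (fun (cd : Int × PySem.Dict Int (Int × Int)) j =>
          let c := cd.1
          let d := cd.2
          let l := (PySem.List.pyGet? bt j).getD 0
          let r := (PySem.List.pyGet? bt (i - j - 1)).getD 0
          let d := ((PySem.List.pyGet? oe j).getD PySem.Dict.empty).items.foldl
            (fun (d : PySem.Dict Int (Int × Int)) kv =>
              let de := (d.getD kv.1 (0, 0)).1
              let dodd := (d.getD kv.1 (0, 0)).2
              d.insert kv.1 (PySem.Int.mod (de + kv.2.2 * r) M, PySem.Int.mod (dodd + kv.2.1 * r) M)) d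
          let d := ((PySem.List.pyGet? oe (i - j - 1)).getD PySem.Dict.empty).items.foldl
            (fun (d : PySem.Dict Int (Int × Int)) kv =>
              let de := (d.getD (kv.1 + j + 1) (0, 0)).1
              let dodd := (d.getD (kv.1 + j + 1) (0, 0)).2
              d.insert (kv.1 + j + 1) (PySem.Int.mod (de + kv.2.2 * l) M, PySem.Int.mod (dodd + kv.2.1 * l) M)) d
          let de := (d.getD j (0, 0)).1
          let dodd := (d.getD j (0, 0)).2
          let d := d.insert j (PySem.Int.mod (de + l * r) M, dodd)
          (c + PySem.Int.mod (l * r) M, d))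
        ((0 : Int), PySem.Dict.empty)
      (bt ++ [PySem.Int.mod cd.1 M], oe ++ [cd.2]))
    ([(1 : Int)], [(PySem.Dict.empty : PySem.Dict Int (Int × Int))])
  let d := (PySem.List.pyGet? st.2 N).getD PySem.Dict.empty
  let l := PySem.List.sorted A (fun x => x) false
  let eo := d.items.foldl
    (fun (eo : Int × Int) kv =>
      let lk := (PySem.List.pyGet? l kv.1).getD 0
      (eo.1 + PySem.Int.mod (kv.2.1 * lk) M, eo.2 + PySem.Int.mod (kv.2.2 * lk) M)) ((0 : Int), (0 : Int))
  let e := PySem.Int.mod eo.1 M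
  let o := PySem.Int.mod eo.2 M
  PySem.Int.mod (PySem.Int.mod (e * alpha) M + (M - PySem.Int.mod (o * beta) M)) M

-- ===== PORT B =====
def calculate_bst_liking_alt (N : Int) (alpha : Int) (beta : Int) (A : List Int) : Int :=
  let M : Int := 10 ^ 9 + 9
  let w := PySem.List.slice (PySem.List.sorted A (fun x => x) false) none (some (max N 0))
  let n := w.length
  let cnt := (List.range n).foldl
    (fun (cnt : List Int) m0 =>
      cnt ++ [PySem.Int.mod ((List.range (m0 + 1)).foldl
        (fun (s : Int) j => s + cnt.getD j 0 * cnt.getD (m0 - j) 0) 0) M]) [(1 : Int)]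
  let eo := (List.range n).foldl
    (fun (eo : List (List (Int × Int))) m0 =>
      let m := m0 + 1
      let row := (List.range (n - m + 1)).foldl
        (fun (row : List (Int × Int)) lo =>
          let p := (List.range m).foldl
            (fun (p : Int × Int) j =>
              let L := cnt.getD j 0
              let R := cnt.getD (m - 1 - j) 0
              let el := ((eo.getD j []).getD lo ((0 : Int), (0 : Int))).1
              let ol := ((eo.getD j []).getD lo ((0 : Int), (0 : Int))).2
              let er := ((eo.getD (m - 1 - j) []).getD (lo + j + 1) ((0 : Int), (0 : Int))).1
              let od := ((eo.getD (m - 1 - j) []).getD (lo + j + 1) ((0 : Int), (0 : Int))).2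
              (PySem.Int.mod (p.1 + L * R * w.getD (lo + j) 0 + ol * R + od * L) M,
               PySem.Int.mod (p.2 + el * R + er * L) M)) ((0 : Int), (0 : Int))
          row ++ [p]) []
      eo ++ [row]) [List.replicate (n + 1) ((0 : Int), (0 : Int))]
  let p := (eo.getD n []).getD 0 ((0 : Int), (0 : Int))
  PySem.Int.mod (PySem.Int.mod (p.1 * alpha) M + (M - PySem.Int.mod (p.2 * beta) M)) M

-- ===== PRECONDITION & SPEC =====
-- Pre_ excludes exactly the inputs on which A raises IndexError (N > len(A): sorted(A)[k] out of
-- range in the final loop; N ≤ -2: oe[N] out of range); at N = -1 A returns 0 and so does B.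
def Pre_calculate_bst_liking (N : Int) (alpha : Int) (beta : Int) (A : List Int) : Prop :=
  (0 ≤ N ∧ N ≤ A.length) ∨ N = -1
instance (N : Int) (alpha : Int) (beta : Int) (A : List Int) : Decidable (Pre_calculate_bst_liking N alpha beta A) := by unfold Pre_calculate_bst_liking; infer_instance
def pvWitness_calculate_bst_liking : Int × Int × Int × List Int := (2, 3, 5, [7, -4, 9])

def Spec_calculate_bst_liking (N : Int) (alpha : Int) (beta : Int) (A : List Int) (out : Int) : Prop := out = calculate_bst_liking_alt N alpha beta A
instance (N : Int) (alpha : Int) (beta : Int) (A : List Int) (out : Int) : Decidable (Spec_calculate_bst_liking N alpha beta A out) := by unfold Spec_calculate_bst_liking; infer_instance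

-- ===== CLAIM (what is proved, stated in full; the proofs are below) =====
def Claim_equal_calculate_bst_liking : Prop := ∀ (N : Int) (alpha : Int) (beta : Int) (A : List Int), Dom_calculate_bst_liking N alpha beta A → Pre_calculate_bst_liking N alpha beta A → Spec_calculate_bst_liking N alpha beta A (calculate_bst_liking N alpha beta A)

-- ===== LEMMAS AND PROOFS =====


def pvMM : Int := 1000000009

theorem pvmod (x : Int) : PySem.Int.mod x (10 ^ 9 + 9) = x % pvMM := by
  rw [PySem.Int.mod_eq_emod_of_pos (by norm_num)]; norm_num [pvMM]

def pvC : Nat → Int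
  | 0 => 1
  | m + 1 => (((List.range (m + 1)).attach.map (fun j => pvC j.1 * pvC (m - j.1))).sum) % pvMM
decreasing_by
  · exact List.mem_range.mp j.2
  · omega

def pvS : Nat → List Int → Int × Int
  | 0, _ => (0, 0)
  | m + 1, v =>
    (((List.range (m + 1)).attach.map (fun j =>
        pvC j.1 * pvC (m - j.1) * v.getD j.1 0
        + (pvS j.1 v).2 * pvC (m - j.1)
        + (pvS (m - j.1) (v.drop (j.1 + 1))).2 * pvC j.1)).sum,
     ((List.range (m + 1)).attach.map (fun j =>
        (pvS j.1 v).1 * pvC (m - j.1)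
        + (pvS (m - j.1) (v.drop (j.1 + 1))).1 * pvC j.1)).sum)
decreasing_by
  all_goals first
    | exact List.mem_range.mp j.2
    | omega

def pvWt (v : List Int) (k : Int) : Int := (PySem.List.pyGet? v k).getD 0

def pvPhi (f : Int × Int → Int) (d : PySem.Dict Int (Int × Int)) (v : List Int) : Int :=
  (d.items.map (fun kv => f kv.2 * pvWt v kv.1)).sum

def pvTermE (n j : Nat) (v : List Int) : Int :=
  pvC j * pvC (n - j) * v.getD j 0 + (pvS j v).2 * pvC (n - j)
    + (pvS (n - j) (v.drop (j + 1))).2 * pvC j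

def pvTermO (n j : Nat) (v : List Int) : Int :=
  (pvS j v).1 * pvC (n - j) + (pvS (n - j) (v.drop (j + 1))).1 * pvC j

theorem pv_attach_sum {m : Nat} (g : Nat → Int) :
    (((List.range m).attach.map (fun j => g j.1)).sum) = ((List.range m).map g).sum := by
  simp

theorem pvC_succ (m : Nat) :
    pvC (m + 1) = (((List.range (m + 1)).map (fun j => pvC j * pvC (m - j))).sum) % pvMM := by
  rw [pvC]
  congr 1
  exact pv_attach_sum (fun j => pvC j * pvC (m - j))

theorem pvS_succ (m : Nat) (v : List Int) :
    pvS (m + 1) v = (((List.range (m + 1)).map (fun j => pvTermE m j v)).sum,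
                     ((List.range (m + 1)).map (fun j => pvTermO m j v)).sum) := by
  rw [pvS]
  unfold pvTermE pvTermO
  exact Prod.ext
    (pv_attach_sum (fun j => pvC j * pvC (m - j) * v.getD j 0 + (pvS j v).2 * pvC (m - j)
      + (pvS (m - j) (v.drop (j + 1))).2 * pvC j))
    (pv_attach_sum (fun j => (pvS j v).1 * pvC (m - j) + (pvS (m - j) (v.drop (j + 1))).1 * pvC j))

theorem pv_sum_modeq {α : Type} (l : List α) (g h : α → Int)
    (hc : ∀ x ∈ l, g x ≡ h x [ZMOD pvMM]) :
    (l.map g).sum ≡ (l.map h).sum [ZMOD pvMM] := by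
  induction l with
  | nil => rfl
  | cons a t ih =>
    simp only [List.map_cons, List.sum_cons]
    exact (hc a (by simp)).add (ih (fun x hx => hc x (List.mem_cons_of_mem a hx)))

theorem pv_emod_modeq (a : Int) : a % pvMM ≡ a [ZMOD pvMM] :=
  Int.emod_emod_of_dvd a dvd_rfl

theorem pvWt_natCast (v : List Int) (m : Nat) : pvWt v (↑m) = v.getD m 0 := by
  simp [pvWt, PySem.List.pyGet?_natCast, List.getD_eq_getElem?_getD]

theorem pvWt_shift (v : List Int) (k : Int) (m : Nat) (hk : 0 ≤ k) :
    pvWt v (k + ↑m + 1) = pvWt (v.drop (m + 1)) k := by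
  unfold pvWt
  rw [PySem.List.pyGet?_of_nonneg v (by omega), PySem.List.pyGet?_of_nonneg (v.drop (m + 1)) hk,
    List.getElem?_drop]
  congr 2
  omega

theorem pv_sum_map_replace (l : List (Int × (Int × Int))) (k : Int) (nv old : Int × Int)
    (f : Int × Int → Int) (v : List Int)
    (hmem : (k, old) ∈ l) (hnd : (l.map Prod.fst).Nodup) :
    ((l.map (fun p => if p.1 == k then (k, nv) else p)).map (fun kv => f kv.2 * pvWt v kv.1)).sum
      = (l.map (fun kv => f kv.2 * pvWt v kv.1)).sum - f old * pvWt v k + f nv * pvWt v k := by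
  induction l with
  | nil => cases hmem
  | cons a t ih =>
    simp only [List.map_cons, List.nodup_cons] at hnd
    by_cases ha : a.1 = k
    · have hnot : ∀ p ∈ t, p.1 ≠ k := by
        intro p hp hpk
        exact hnd.1 (ha ▸ hpk ▸ List.mem_map_of_mem hp)
      have haeq : a = (k, old) := by
        rcases List.mem_cons.mp hmem with h | h
        · exact h.symm
        · exact absurd rfl (hnot _ h)
      have hmapid : t.map (fun p => if p.1 == k then (k, nv) else p) = t := by
        have : t.map (fun p => if p.1 == k then (k, nv) else p) = t.map id :=
          List.map_congr_left (fun p hp => by simp [hnot p hp])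
        rw [this, List.map_id]
      subst haeq
      simp only [List.map_cons, beq_self_eq_true, if_pos, List.sum_cons, hmapid]
      ring
    · have hmem' : (k, old) ∈ t := by
        rcases List.mem_cons.mp hmem with h | h
        · exact absurd (congrArg Prod.fst h.symm) ha
        · exact h
      have := ih hmem' hnd.2
      simp only [List.map_cons, List.sum_cons, if_neg (by simp [ha] : ¬ (a.1 == k) = true), this]
      ring

theorem pv_phi_insert (f : Int × Int → Int) (d : PySem.Dict Int (Int × Int)) (k : Int)
    (nv : Int × Int) (v : List Int) (hnd : d.keys.Nodup) (hf0 : f (0, 0) = 0) :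
    pvPhi f (d.insert k nv) v
      = pvPhi f d v + (f nv - f (d.getD k (0, 0))) * pvWt v k := by
  by_cases h : d.contains k = true
  · obtain ⟨val, hval⟩ : ∃ val, d.get? k = some val := by
      rw [PySem.Dict.contains_eq_isSome_get?] at h
      exact Option.isSome_iff_exists.mp h
    have hgd : d.getD k (0, 0) = val := PySem.Dict.getD_of_get?_eq_some d _ hval
    have hmem : (k, val) ∈ d.items := PySem.Dict.mem_items_of_get?_eq_some d hval
    have hndk : (d.items.map Prod.fst).Nodup := by
      simpa [PySem.Dict.keys] using hnd
    rw [pvPhi, PySem.Dict.items_insert_of_contains d nv h,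
      pv_sum_map_replace d.items k nv val f v hmem hndk, hgd]
    rw [pvPhi]; ring
  · have hgd : d.getD k (0, 0) = (0, 0) := by
      simp [PySem.Dict.getD_eq_get?_getD, (PySem.Dict.get?_eq_none_iff_contains d k).mpr (by simpa using h)]
    rw [pvPhi, PySem.Dict.items_insert_of_not_contains d nv (by simpa using h), hgd, hf0]
    simp [pvPhi]

theorem pv_keys_nonneg_insert (d : PySem.Dict Int (Int × Int)) (k : Int) (nv : Int × Int)
    (hd : ∀ kv ∈ d.items, 0 ≤ kv.1) (hk : 0 ≤ k) :
    ∀ kv ∈ (d.insert k nv).items, 0 ≤ kv.1 := by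
  intro kv hkv
  rcases (PySem.Dict.mem_items_insert _ _ _ _).mp hkv with h | h
  · rw [h]; exact hk
  · exact hd kv h.1

def pvUpd (kf : Int → Int) (fac : Int) (d : PySem.Dict Int (Int × Int))
    (kv : Int × (Int × Int)) : PySem.Dict Int (Int × Int) :=
  d.insert (kf kv.1)
    (PySem.Int.mod ((d.getD (kf kv.1) (0, 0)).1 + kv.2.2 * fac) (10 ^ 9 + 9),
     PySem.Int.mod ((d.getD (kf kv.1) (0, 0)).2 + kv.2.1 * fac) (10 ^ 9 + 9))

theorem pv_loop_nodup (s : List (Int × (Int × Int))) (kf : Int → Int) (fac : Int)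
    (d : PySem.Dict Int (Int × Int)) (hnd : d.keys.Nodup) :
    (s.foldl (pvUpd kf fac) d).keys.Nodup := by
  induction s generalizing d with
  | nil => exact hnd
  | cons a t ih => exact ih _ (PySem.Dict.nodup_keys_insert _ _ _ hnd)

theorem pv_loop_nonneg (s : List (Int × (Int × Int))) (kf : Int → Int) (fac : Int)
    (d : PySem.Dict Int (Int × Int)) (hd : ∀ kv ∈ d.items, 0 ≤ kv.1)
    (hk : ∀ kv ∈ s, 0 ≤ kf kv.1) :
    ∀ kv ∈ (s.foldl (pvUpd kf fac) d).items, 0 ≤ kv.1 := by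
  induction s generalizing d with
  | nil => exact hd
  | cons a t ih =>
    exact ih _ (pv_keys_nonneg_insert _ _ _ hd (hk a (by simp)))
      (fun kv hkv => hk kv (List.mem_cons_of_mem a hkv))

theorem pv_loop_phi (s : List (Int × (Int × Int))) (kf : Int → Int) (fac : Int)
    (d : PySem.Dict Int (Int × Int)) (v : List Int) (hnd : d.keys.Nodup)
    (f : Int × Int → Int) (g : Int × Int → Int) (hf0 : f (0, 0) = 0)
    (hsel : ∀ (x y a b : Int),
      f (PySem.Int.mod (x + a) (10 ^ 9 + 9), PySem.Int.mod (y + b) (10 ^ 9 + 9)) - f (x, y)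
        ≡ g (a, b) [ZMOD pvMM]) :
    pvPhi f (s.foldl (pvUpd kf fac) d) v
      ≡ pvPhi f d v
        + (s.map (fun kv => g (kv.2.2 * fac, kv.2.1 * fac) * pvWt v (kf kv.1))).sum [ZMOD pvMM] := by
  induction s generalizing d with
  | nil => simp [Int.ModEq.refl]
  | cons a t ih =>
    simp only [List.foldl_cons, List.map_cons, List.sum_cons]
    have h1 := ih (pvUpd kf fac d a) (PySem.Dict.nodup_keys_insert _ _ _ hnd)
    have h2 : pvPhi f (pvUpd kf fac d a) v
        ≡ pvPhi f d v + g (a.2.2 * fac, a.2.1 * fac) * pvWt v (kf a.1) [ZMOD pvMM] := by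
      rw [pvUpd, pv_phi_insert f d _ _ v hnd hf0]
      exact (Int.ModEq.refl _).add ((hsel _ _ _ _).mul_right _)
    calc pvPhi f (t.foldl (pvUpd kf fac) (pvUpd kf fac d a)) v
        ≡ pvPhi f (pvUpd kf fac d a) v + (t.map (fun kv => g (kv.2.2 * fac, kv.2.1 * fac) * pvWt v (kf kv.1))).sum [ZMOD pvMM] := h1
      _ ≡ pvPhi f d v + g (a.2.2 * fac, a.2.1 * fac) * pvWt v (kf a.1) + (t.map (fun kv => g (kv.2.2 * fac, kv.2.1 * fac) * pvWt v (kf kv.1))).sum [ZMOD pvMM] := h2.add_right _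
      _ = pvPhi f d v + (g (a.2.2 * fac, a.2.1 * fac) * pvWt v (kf a.1) + (t.map (fun kv => g (kv.2.2 * fac, kv.2.1 * fac) * pvWt v (kf kv.1))).sum) := by ring

def pvStepJ (i : Int) (bt : List Int) (oe : List (PySem.Dict Int (Int × Int)))
    (cd : Int × PySem.Dict Int (Int × Int)) (j : Int) : Int × PySem.Dict Int (Int × Int) :=
  let l := (PySem.List.pyGet? bt j).getD 0
  let r := (PySem.List.pyGet? bt (i - j - 1)).getD 0
  let d := ((PySem.List.pyGet? oe j).getD PySem.Dict.empty).items.foldl (pvUpd (fun k => k) r) cd.2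
  let d := ((PySem.List.pyGet? oe (i - j - 1)).getD PySem.Dict.empty).items.foldl (pvUpd (fun k => k + j + 1) l) d
  let d2 := d.insert j (PySem.Int.mod ((d.getD j (0, 0)).1 + l * r) (10 ^ 9 + 9), (d.getD j (0, 0)).2)
  (cd.1 + PySem.Int.mod (l * r) (10 ^ 9 + 9), d2)

def pvStepI (st : List Int × List (PySem.Dict Int (Int × Int))) (i : Int) :
    List Int × List (PySem.Dict Int (Int × Int)) :=
  let cd := (PySem.List.pyRange 0 i).foldl (pvStepJ i st.1 st.2) (0, PySem.Dict.empty)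
  (st.1 ++ [PySem.Int.mod cd.1 (10 ^ 9 + 9)], st.2 ++ [cd.2])

def pvTab (N : Int) : List Int × List (PySem.Dict Int (Int × Int)) :=
  (PySem.List.pyRange 1 (N + 1)).foldl pvStepI ([1], [PySem.Dict.empty])

def pvDP (k : Nat) (d : PySem.Dict Int (Int × Int)) : Prop :=
  d.keys.Nodup ∧ (∀ kv ∈ d.items, 0 ≤ kv.1) ∧
  (∀ v, pvPhi Prod.fst d v ≡ (pvS k v).1 [ZMOD pvMM]
      ∧ pvPhi Prod.snd d v ≡ (pvS k v).2 [ZMOD pvMM])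

theorem pv_hsel_fst : ∀ (x y a b : Int),
    Prod.fst (PySem.Int.mod (x + a) (10 ^ 9 + 9), PySem.Int.mod (y + b) (10 ^ 9 + 9))
      - Prod.fst (x, y) ≡ Prod.fst (a, b) [ZMOD pvMM] := by
  intro x y a b
  simp only [pvmod]
  simpa using (pv_emod_modeq (x + a)).sub_right x

theorem pv_hsel_snd : ∀ (x y a b : Int),
    Prod.snd (PySem.Int.mod (x + a) (10 ^ 9 + 9), PySem.Int.mod (y + b) (10 ^ 9 + 9))
      - Prod.snd (x, y) ≡ Prod.snd (a, b) [ZMOD pvMM] := by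
  intro x y a b
  simp only [pvmod]
  simpa using (pv_emod_modeq (y + b)).sub_right y

theorem pvStepJ_char (n m : Nat) (hm : m ≤ n) (bt : List Int)
    (oe : List (PySem.Dict Int (Int × Int)))
    (hbt : bt = (List.range (n + 1)).map pvC)
    (hoe : ∀ k : Nat, k ≤ n → pvDP k (oe.getD k PySem.Dict.empty))
    (cd : Int × PySem.Dict Int (Int × Int)) (hnd : cd.2.keys.Nodup)
    (hnn : ∀ kv ∈ cd.2.items, 0 ≤ kv.1) :
    (pvStepJ (↑n + 1) bt oe cd ↑m).1 = cd.1 + (pvC m * pvC (n - m)) % pvMM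
    ∧ (pvStepJ (↑n + 1) bt oe cd ↑m).2.keys.Nodup
    ∧ (∀ kv ∈ (pvStepJ (↑n + 1) bt oe cd ↑m).2.items, 0 ≤ kv.1)
    ∧ (∀ v, pvPhi Prod.fst (pvStepJ (↑n + 1) bt oe cd ↑m).2 v
          ≡ pvPhi Prod.fst cd.2 v + pvTermE n m v [ZMOD pvMM]
        ∧ pvPhi Prod.snd (pvStepJ (↑n + 1) bt oe cd ↑m).2 v
          ≡ pvPhi Prod.snd cd.2 v + pvTermO n m v [ZMOD pvMM]) := by
  have hmlt : m < n + 1 := by omega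
  have hmlt2 : n - m < n + 1 := by omega
  have hl : (PySem.List.pyGet? bt ↑m).getD 0 = pvC m := by
    subst hbt
    simp [PySem.List.pyGet?_natCast, List.getElem?_map, List.getElem?_range, hmlt]
  have hi : (↑n + 1 - ↑m - 1 : Int) = ↑(n - m) := by omega
  have hr : (PySem.List.pyGet? bt (↑n + 1 - ↑m - 1)).getD 0 = pvC (n - m) := by
    subst hbt
    rw [hi]
    simp [PySem.List.pyGet?_natCast, List.getElem?_map, List.getElem?_range, hmlt2]
  have hoej : (PySem.List.pyGet? oe ↑m).getD PySem.Dict.empty = oe.getD m PySem.Dict.empty := by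
    simp [PySem.List.pyGet?_natCast, List.getD_eq_getElem?_getD]
  have hoer : (PySem.List.pyGet? oe (↑n + 1 - ↑m - 1)).getD PySem.Dict.empty
      = oe.getD (n - m) PySem.Dict.empty := by
    rw [hi]
    simp [PySem.List.pyGet?_natCast, List.getD_eq_getElem?_getD]
  have hstep : pvStepJ (↑n + 1) bt oe cd ↑m =
      (cd.1 + PySem.Int.mod (pvC m * pvC (n - m)) (10 ^ 9 + 9),
       let d2 := (oe.getD (n - m) PySem.Dict.empty).items.foldl (pvUpd (fun k => k + ↑m + 1) (pvC m))
          ((oe.getD m PySem.Dict.empty).items.foldl (pvUpd (fun k => k) (pvC (n - m))) cd.2)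
       d2.insert ↑m (PySem.Int.mod ((d2.getD ↑m (0, 0)).1 + pvC m * pvC (n - m)) (10 ^ 9 + 9),
         (d2.getD ↑m (0, 0)).2)) := by
    unfold pvStepJ
    rw [hl, hr, hoej, hoer]
  obtain ⟨ndm, nnm, phim⟩ := hoe m (by omega)
  obtain ⟨ndr, nnr, phir⟩ := hoe (n - m) (by omega)
  set d1 := (oe.getD m PySem.Dict.empty).items.foldl (pvUpd (fun k => k) (pvC (n - m))) cd.2 with hd1
  set d2 := (oe.getD (n - m) PySem.Dict.empty).items.foldl (pvUpd (fun k => k + ↑m + 1) (pvC m)) d1 with hd2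
  have hnd1 : d1.keys.Nodup := pv_loop_nodup _ _ _ _ hnd
  have hnn1 : ∀ kv ∈ d1.items, 0 ≤ kv.1 := pv_loop_nonneg _ _ _ _ hnn nnm
  have hnd2 : d2.keys.Nodup := pv_loop_nodup _ _ _ _ hnd1
  have hnn2 : ∀ kv ∈ d2.items, 0 ≤ kv.1 :=
    pv_loop_nonneg _ _ _ _ hnn1 (fun kv hkv => by have := nnr kv hkv; omega)
  rw [hstep]
  refine ⟨by rw [pvmod], PySem.Dict.nodup_keys_insert _ _ _ hnd2,
    pv_keys_nonneg_insert _ _ _ hnn2 (by positivity), ?_⟩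
  intro v
  have wt1 : ∀ (fac : Int) (sel : Int × Int → Int),
      ((oe.getD m PySem.Dict.empty).items.map
        (fun kv => sel (kv.2.2 * fac, kv.2.1 * fac) * pvWt v ((fun k => k) kv.1))).sum
      = ((oe.getD m PySem.Dict.empty).items.map
          (fun kv => sel (kv.2.2 * fac, kv.2.1 * fac) * pvWt v kv.1)).sum := fun _ _ => rfl
  -- first loop sums
  have hsum1f : ((oe.getD m PySem.Dict.empty).items.map
      (fun kv => Prod.fst (kv.2.2 * pvC (n - m), kv.2.1 * pvC (n - m)) * pvWt v ((fun k => k) kv.1))).sum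
      = pvPhi Prod.snd (oe.getD m PySem.Dict.empty) v * pvC (n - m) := by
    rw [pvPhi, ← List.sum_map_mul_right]
    exact congrArg List.sum (List.map_congr_left (fun kv _ => by simp; ring))
  have hsum1s : ((oe.getD m PySem.Dict.empty).items.map
      (fun kv => Prod.snd (kv.2.2 * pvC (n - m), kv.2.1 * pvC (n - m)) * pvWt v ((fun k => k) kv.1))).sum
      = pvPhi Prod.fst (oe.getD m PySem.Dict.empty) v * pvC (n - m) := by
    rw [pvPhi, ← List.sum_map_mul_right]
    exact congrArg List.sum (List.map_congr_left (fun kv _ => by simp; ring))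
  have hsum2f : ((oe.getD (n - m) PySem.Dict.empty).items.map
      (fun kv => Prod.fst (kv.2.2 * pvC m, kv.2.1 * pvC m) * pvWt v ((fun k => k + (m : Int) + 1) kv.1))).sum
      = pvPhi Prod.snd (oe.getD (n - m) PySem.Dict.empty) (v.drop (m + 1)) * pvC m := by
    rw [pvPhi, ← List.sum_map_mul_right]
    refine congrArg List.sum (List.map_congr_left (fun kv hkv => ?_))
    simp only
    rw [pvWt_shift v kv.1 m (nnr kv hkv)]
    ring
  have hsum2s : ((oe.getD (n - m) PySem.Dict.empty).items.map
      (fun kv => Prod.snd (kv.2.2 * pvC m, kv.2.1 * pvC m) * pvWt v ((fun k => k + (m : Int) + 1) kv.1))).sum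
      = pvPhi Prod.fst (oe.getD (n - m) PySem.Dict.empty) (v.drop (m + 1)) * pvC m := by
    rw [pvPhi, ← List.sum_map_mul_right]
    refine congrArg List.sum (List.map_congr_left (fun kv hkv => ?_))
    simp only
    rw [pvWt_shift v kv.1 m (nnr kv hkv)]
    ring
  have h1f : pvPhi Prod.fst d1 v ≡ pvPhi Prod.fst cd.2 v + (pvS m v).2 * pvC (n - m) [ZMOD pvMM] := by
    have := pv_loop_phi (oe.getD m PySem.Dict.empty).items (fun k => k) (pvC (n - m)) cd.2 v hnd
      Prod.fst Prod.fst rfl pv_hsel_fst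
    rw [hsum1f] at this
    exact this.trans ((Int.ModEq.refl _).add (((phim v).2).mul_right _))
  have h1s : pvPhi Prod.snd d1 v ≡ pvPhi Prod.snd cd.2 v + (pvS m v).1 * pvC (n - m) [ZMOD pvMM] := by
    have := pv_loop_phi (oe.getD m PySem.Dict.empty).items (fun k => k) (pvC (n - m)) cd.2 v hnd
      Prod.snd Prod.snd rfl pv_hsel_snd
    rw [hsum1s] at this
    exact this.trans ((Int.ModEq.refl _).add (((phim v).1).mul_right _))
  have h2f : pvPhi Prod.fst d2 v ≡ pvPhi Prod.fst d1 v
      + (pvS (n - m) (v.drop (m + 1))).2 * pvC m [ZMOD pvMM] := by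
    have := pv_loop_phi (oe.getD (n - m) PySem.Dict.empty).items (fun k => k + ↑m + 1) (pvC m) d1 v hnd1
      Prod.fst Prod.fst rfl pv_hsel_fst
    rw [hsum2f] at this
    exact this.trans ((Int.ModEq.refl _).add (((phir (v.drop (m + 1))).2).mul_right _))
  have h2s : pvPhi Prod.snd d2 v ≡ pvPhi Prod.snd d1 v
      + (pvS (n - m) (v.drop (m + 1))).1 * pvC m [ZMOD pvMM] := by
    have := pv_loop_phi (oe.getD (n - m) PySem.Dict.empty).items (fun k => k + ↑m + 1) (pvC m) d1 v hnd1
      Prod.snd Prod.snd rfl pv_hsel_snd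
    rw [hsum2s] at this
    exact this.trans ((Int.ModEq.refl _).add (((phir (v.drop (m + 1))).1).mul_right _))
  have h3f : pvPhi Prod.fst (d2.insert ↑m
      (PySem.Int.mod ((d2.getD ↑m (0,0)).1 + pvC m * pvC (n - m)) (10 ^ 9 + 9), (d2.getD ↑m (0,0)).2)) v
      ≡ pvPhi Prod.fst d2 v + pvC m * pvC (n - m) * v.getD m 0 [ZMOD pvMM] := by
    rw [pv_phi_insert Prod.fst d2 _ _ v hnd2 rfl]
    refine (Int.ModEq.refl _).add ?_
    rw [pvWt_natCast, pvmod]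
    exact ((pv_emod_modeq _).sub_right _).mul_right _ |>.trans (by rw [add_sub_cancel_left])
  have h3s : pvPhi Prod.snd (d2.insert ↑m
      (PySem.Int.mod ((d2.getD ↑m (0,0)).1 + pvC m * pvC (n - m)) (10 ^ 9 + 9), (d2.getD ↑m (0,0)).2)) v
      = pvPhi Prod.snd d2 v := by
    rw [pv_phi_insert Prod.snd d2 _ _ v hnd2 rfl]
    simp
  constructor
  · calc pvPhi Prod.fst ((d2.insert ↑m
          (PySem.Int.mod ((d2.getD ↑m (0,0)).1 + pvC m * pvC (n - m)) (10 ^ 9 + 9), (d2.getD ↑m (0,0)).2))) v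
        ≡ pvPhi Prod.fst d2 v + pvC m * pvC (n - m) * v.getD m 0 [ZMOD pvMM] := h3f
      _ ≡ (pvPhi Prod.fst d1 v + (pvS (n - m) (v.drop (m + 1))).2 * pvC m)
            + pvC m * pvC (n - m) * v.getD m 0 [ZMOD pvMM] := h2f.add_right _
      _ ≡ ((pvPhi Prod.fst cd.2 v + (pvS m v).2 * pvC (n - m)) + (pvS (n - m) (v.drop (m + 1))).2 * pvC m)
            + pvC m * pvC (n - m) * v.getD m 0 [ZMOD pvMM] := (h1f.add_right _).add_right _
      _ = pvPhi Prod.fst cd.2 v + pvTermE n m v := by unfold pvTermE; ring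
  · rw [h3s]
    calc pvPhi Prod.snd d2 v
        ≡ pvPhi Prod.snd d1 v + (pvS (n - m) (v.drop (m + 1))).1 * pvC m [ZMOD pvMM] := h2s
      _ ≡ (pvPhi Prod.snd cd.2 v + (pvS m v).1 * pvC (n - m))
            + (pvS (n - m) (v.drop (m + 1))).1 * pvC m [ZMOD pvMM] := h1s.add_right _
      _ = pvPhi Prod.snd cd.2 v + pvTermO n m v := by unfold pvTermO; ring

theorem pv_jfold (n : Nat) (bt : List Int) (oe : List (PySem.Dict Int (Int × Int)))
    (hbt : bt = (List.range (n + 1)).map pvC)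
    (hoe : ∀ k : Nat, k ≤ n → pvDP k (oe.getD k PySem.Dict.empty)) :
    ∀ m : Nat, m ≤ n + 1 →
      ((PySem.List.pyRange 0 ↑m).foldl (pvStepJ (↑n + 1) bt oe) (0, PySem.Dict.empty)).1
        = ((List.range m).map (fun j => (pvC j * pvC (n - j)) % pvMM)).sum
      ∧ ((PySem.List.pyRange 0 ↑m).foldl (pvStepJ (↑n + 1) bt oe) (0, PySem.Dict.empty)).2.keys.Nodup
      ∧ (∀ kv ∈ ((PySem.List.pyRange 0 ↑m).foldl (pvStepJ (↑n + 1) bt oe) (0, PySem.Dict.empty)).2.items, 0 ≤ kv.1)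
      ∧ (∀ v, pvPhi Prod.fst ((PySem.List.pyRange 0 ↑m).foldl (pvStepJ (↑n + 1) bt oe) (0, PySem.Dict.empty)).2 v
            ≡ ((List.range m).map (fun j => pvTermE n j v)).sum [ZMOD pvMM]
          ∧ pvPhi Prod.snd ((PySem.List.pyRange 0 ↑m).foldl (pvStepJ (↑n + 1) bt oe) (0, PySem.Dict.empty)).2 v
            ≡ ((List.range m).map (fun j => pvTermO n j v)).sum [ZMOD pvMM]) := by
  intro m
  induction m with
  | zero =>
    intro _
    rw [show ((0 : Nat) : Int) = 0 by norm_num, PySem.List.pyRange_one_eq_nil le_rfl]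
    refine ⟨by simp, ?_, ?_, ?_⟩
    · simpa using PySem.Dict.nodup_keys_empty (κ := Int) (ν := Int × Int)
    · simp [PySem.Dict.items, PySem.Dict.empty]
    · intro v
      constructor <;> simp [pvPhi, PySem.Dict.items, PySem.Dict.empty, Int.ModEq.refl]
  | succ m ih =>
    intro hm1
    have hm : m ≤ n := by omega
    have ihm := ih (by omega)
    have hsplit : PySem.List.pyRange 0 ↑(m + 1) = PySem.List.pyRange 0 ↑m ++ [(↑m : Int)] := by
      have : ((m + 1 : Nat) : Int) = ↑m + 1 := by push_cast; ring
      rw [this]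
      exact PySem.List.pyRange_one_succ_right (by positivity)
    rw [hsplit, List.foldl_append]
    simp only [List.foldl_cons, List.foldl_nil]
    obtain ⟨hc, hnd, hnn, hphi⟩ := ihm
    obtain ⟨sc, snd, snn, sphi⟩ := pvStepJ_char n m hm bt oe hbt hoe _ hnd hnn
    refine ⟨?_, snd, snn, ?_⟩
    · rw [sc, hc, List.range_succ, List.map_append, List.sum_append]
      simp
    · intro v
      constructor
      · refine ((sphi v).1.trans ((hphi v).1.add_right _)).trans ?_
        rw [List.range_succ, List.map_append, List.sum_append]
        simp
      · refine ((sphi v).2.trans ((hphi v).2.add_right _)).trans ?_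
        rw [List.range_succ, List.map_append, List.sum_append]
        simp

theorem pvC_zero : pvC 0 = 1 := by rw [pvC]

theorem pvTab_char (n : Nat) :
    (pvTab ↑n).1 = (List.range (n + 1)).map pvC
    ∧ (pvTab ↑n).2.length = n + 1
    ∧ ∀ k : Nat, k ≤ n → pvDP k ((pvTab ↑n).2.getD k PySem.Dict.empty) := by
  induction n with
  | zero =>
    have h0 : pvTab 0 = ([1], [PySem.Dict.empty]) := by
      rw [pvTab, PySem.List.pyRange_one_eq_nil (by norm_num)]
      rfl
    rw [show ((0 : Nat) : Int) = 0 by norm_num, h0]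
    refine ⟨by simp [List.range_succ, pvC_zero], by simp, ?_⟩
    intro k hk
    interval_cases k
    refine ⟨by simpa using PySem.Dict.nodup_keys_empty (κ := Int) (ν := Int × Int),
      by simp [PySem.Dict.items, PySem.Dict.empty], ?_⟩
    intro v
    constructor <;> simp [pvPhi, PySem.Dict.items, PySem.Dict.empty, pvS, Int.ModEq.refl]
  | succ n ih =>
    obtain ⟨hbt, hlen, hdp⟩ := ih
    have hcast : ((n + 1 : Nat) : Int) = ↑n + 1 := by push_cast; ring
    have hstep : pvTab ↑(n + 1) = pvStepI (pvTab ↑n) (↑n + 1) := by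
      rw [pvTab, pvTab]
      have h1 : ((n + 1 : Nat) : Int) + 1 = (↑n + 1) + 1 := by push_cast; ring
      rw [h1, PySem.List.pyRange_one_succ_right (show (1 : Int) ≤ ↑n + 1 by omega),
        List.foldl_append]
      simp
    obtain ⟨hc, hnd, hnn, hphi⟩ := pv_jfold n (pvTab ↑n).1 (pvTab ↑n).2 hbt hdp (n + 1) le_rfl
    rw [hcast] at hc hnd hnn hphi
    have hbt' : (pvTab ↑(n + 1)).1 = (List.range (n + 2)).map pvC := by
      rw [hstep, pvStepI]
      simp only [hc]
      have hsum : ((List.map (fun j => pvC j * pvC (n - j) % pvMM) (List.range (n + 1))).sum) % pvMM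
          = pvC (n + 1) := by
        rw [pvC_succ]
        exact pv_sum_modeq _ _ _ (fun j _ => pv_emod_modeq _)
      have hrhs : (List.range (n + 2)).map pvC = (List.range (n + 1)).map pvC ++ [pvC (n + 1)] := by
        rw [show n + 2 = (n + 1) + 1 from rfl, List.range_succ, List.map_append, List.map_singleton]
      rw [hbt, hrhs, pvmod, hsum]
    refine ⟨hbt', ?_, ?_⟩
    · rw [hstep, pvStepI]
      simp [hlen]
    · intro k hk
      rw [hstep, pvStepI]
      simp only
      rcases Nat.lt_or_ge k (n + 1) with hlt | hge
      · have hgd : ((pvTab ↑n).2 ++ [((PySem.List.pyRange 0 (↑n + 1)).foldl (pvStepJ (↑n + 1) (pvTab ↑n).1 (pvTab ↑n).2) (0, PySem.Dict.empty)).2]).getD k PySem.Dict.empty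
            = (pvTab ↑n).2.getD k PySem.Dict.empty := by
          rw [List.getD_eq_getElem?_getD, List.getElem?_append_left (by rw [hlen]; omega),
            ← List.getD_eq_getElem?_getD]
        rw [hgd]
        exact hdp k (by omega)
      · have hkeq : k = n + 1 := by omega
        subst hkeq
        have hgd : ((pvTab ↑n).2 ++ [((PySem.List.pyRange 0 (↑n + 1)).foldl (pvStepJ (↑n + 1) (pvTab ↑n).1 (pvTab ↑n).2) (0, PySem.Dict.empty)).2]).getD (n + 1) PySem.Dict.empty
            = ((PySem.List.pyRange 0 (↑n + 1)).foldl (pvStepJ (↑n + 1) (pvTab ↑n).1 (pvTab ↑n).2) (0, PySem.Dict.empty)).2 := by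
          rw [List.getD_eq_getElem?_getD, List.getElem?_append_right (by rw [hlen])]
          simp [hlen]
        rw [hgd]
        refine ⟨hnd, hnn, ?_⟩
        intro v
        rw [pvS_succ]
        exact ⟨(hphi v).1, (hphi v).2⟩

theorem pv_pairfold (s : List (Int × (Int × Int))) (p : Int × Int)
    (g1 g2 : Int × (Int × Int) → Int) :
    s.foldl (fun eo kv => (eo.1 + g1 kv, eo.2 + g2 kv)) p
      = (p.1 + (s.map g1).sum, p.2 + (s.map g2).sum) := by
  induction s generalizing p with
  | nil => simp
  | cons a t ih =>
    simp only [List.foldl_cons, List.map_cons, List.sum_cons, ih]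
    exact Prod.ext (by ring) (by ring)

theorem pvS_congr : ∀ (m : Nat) (v₁ v₂ : List Int),
    (∀ k, k < m → v₁.getD k 0 = v₂.getD k 0) → pvS m v₁ = pvS m v₂ := by
  intro m
  induction m using Nat.strong_induction_on with
  | _ m ih =>
    intro v₁ v₂ hagree
    match m with
    | 0 => simp [pvS]
    | m + 1 =>
      rw [pvS_succ, pvS_succ]
      have he : ∀ j, j < m + 1 → pvTermE m j v₁ = pvTermE m j v₂ ∧ pvTermO m j v₁ = pvTermO m j v₂ := by
        intro j hj
        have h1 : pvS j v₁ = pvS j v₂ := ih j (by omega) _ _ (fun k hk => hagree k (by omega))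
        have h2 : pvS (m - j) (v₁.drop (j + 1)) = pvS (m - j) (v₂.drop (j + 1)) := by
          refine ih (m - j) (by omega) _ _ (fun k hk => ?_)
          have e1 : (v₁.drop (j + 1)).getD k 0 = v₁.getD (j + 1 + k) 0 := by
            simp [List.getD_eq_getElem?_getD, List.getElem?_drop]
          have e2 : (v₂.drop (j + 1)).getD k 0 = v₂.getD (j + 1 + k) 0 := by
            simp [List.getD_eq_getElem?_getD, List.getElem?_drop]
          rw [e1, e2]
          exact hagree _ (by omega)
        have h3 : v₁.getD j 0 = v₂.getD j 0 := hagree j (by omega)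
        unfold pvTermE pvTermO
        rw [h1, h2, h3]
        exact ⟨rfl, rfl⟩
      refine Prod.ext ?_ ?_
      · exact congrArg List.sum (List.map_congr_left
          (fun j hj => (he j (List.mem_range.mp hj)).1))
      · exact congrArg List.sum (List.map_congr_left
          (fun j hj => (he j (List.mem_range.mp hj)).2))

def pvCnt (n : Nat) : List Int :=
  (List.range n).foldl
    (fun (cnt : List Int) m0 =>
      cnt ++ [PySem.Int.mod ((List.range (m0 + 1)).foldl
        (fun (s : Int) j => s + cnt.getD j 0 * cnt.getD (m0 - j) 0) 0) (10 ^ 9 + 9)]) [(1 : Int)]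

def pvCell (w : List Int) (cnt : List Int) (eo : List (List (Int × Int))) (m lo : Nat) : Int × Int :=
  (List.range m).foldl
    (fun (p : Int × Int) j =>
      (PySem.Int.mod (p.1 + cnt.getD j 0 * cnt.getD (m - 1 - j) 0 * w.getD (lo + j) 0
          + ((eo.getD j []).getD lo ((0 : Int), (0 : Int))).2 * cnt.getD (m - 1 - j) 0
          + ((eo.getD (m - 1 - j) []).getD (lo + j + 1) ((0 : Int), (0 : Int))).2 * cnt.getD j 0) (10 ^ 9 + 9),
       PySem.Int.mod (p.2 + ((eo.getD j []).getD lo ((0 : Int), (0 : Int))).1 * cnt.getD (m - 1 - j) 0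
          + ((eo.getD (m - 1 - j) []).getD (lo + j + 1) ((0 : Int), (0 : Int))).1 * cnt.getD j 0) (10 ^ 9 + 9)))
    ((0 : Int), (0 : Int))

def pvEoStep (w : List Int) (n : Nat) (cnt : List Int)
    (eo : List (List (Int × Int))) (m0 : Nat) : List (List (Int × Int)) :=
  eo ++ [(List.range (n - (m0 + 1) + 1)).foldl
    (fun (row : List (Int × Int)) lo => row ++ [pvCell w cnt eo (m0 + 1) lo]) []]

def pvEoTab (w : List Int) (n : Nat) (cnt : List Int) : List (List (Int × Int)) :=
  (List.range n).foldl (pvEoStep w n cnt) [List.replicate (n + 1) ((0 : Int), (0 : Int))]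

theorem pvCnt_char (n : Nat) : pvCnt n = (List.range (n + 1)).map pvC := by
  induction n with
  | zero =>
    simp [pvCnt, List.range_succ, pvC_zero]
  | succ n ih =>
    have hpref : pvCnt (n + 1) = pvCnt n
        ++ [PySem.Int.mod ((List.range (n + 1)).foldl
          (fun (s : Int) j => s + (pvCnt n).getD j 0 * (pvCnt n).getD (n - j) 0) 0) (10 ^ 9 + 9)] := by
      rw [pvCnt, List.range_succ, List.foldl_append, List.foldl_cons, List.foldl_nil]
      simp only [pvCnt]
      rw [List.range_succ]
    rw [hpref, ih]
    have hsum : (List.range (n + 1)).foldl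
        (fun (s : Int) j => s + ((List.range (n + 1)).map pvC).getD j 0
          * ((List.range (n + 1)).map pvC).getD (n - j) 0) 0
        = ((List.range (n + 1)).map (fun j => pvC j * pvC (n - j))).sum := by
      rw [PySem.List.foldl_add]
      rw [zero_add]
      refine congrArg List.sum (List.map_congr_left (fun j hj => ?_))
      have hj' := List.mem_range.mp hj
      rw [PySem.List.getD_map_range pvC (n + 1) j 0 (by omega),
        PySem.List.getD_map_range pvC (n + 1) (n - j) 0 (by omega)]
    rw [hsum, pvmod, ← pvC_succ, show n + 1 + 1 = n + 2 from rfl,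
      show (List.range (n + 2)).map pvC = (List.range (n + 1)).map pvC ++ [pvC (n + 1)] by
        rw [show n + 2 = (n + 1) + 1 from rfl, List.range_succ, List.map_append, List.map_singleton]]

theorem pv_foldmod (hF hG : Nat → Int) : ∀ (m : Nat),
    (List.range m).foldl (fun (p : Int × Int) j =>
        (PySem.Int.mod (p.1 + hF j) (10 ^ 9 + 9), PySem.Int.mod (p.2 + hG j) (10 ^ 9 + 9))) ((0 : Int), (0 : Int))
      = (((List.range m).map hF).sum % pvMM, ((List.range m).map hG).sum % pvMM) := by
  intro m
  induction m with
  | zero => simp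
  | succ m ih =>
    rw [List.range_succ, List.foldl_append, List.foldl_cons, List.foldl_nil, ih]
    rw [List.map_append, List.map_append, List.sum_append, List.sum_append]
    refine Prod.ext ?_ ?_ <;> simp only [pvmod, List.map_singleton, List.sum_singleton]
    · exact (pv_emod_modeq _).add_right (hF m)
    · exact (pv_emod_modeq _).add_right (hG m)

theorem pv_getD_drop (w : List Int) (lo t : Nat) :
    (w.drop lo).getD t 0 = w.getD (lo + t) 0 := by
  simp [List.getD_eq_getElem?_getD, List.getElem?_drop]

theorem pv_drop_drop (w : List Int) (lo t : Nat) :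
    (w.drop lo).drop (t + 1) = w.drop (lo + t + 1) := by
  rw [List.drop_drop, Nat.add_assoc]

theorem pvCell_char (w : List Int) (n : Nat) (T : List (List (Int × Int))) (m0 : Nat)
    (hm : m0 + 1 ≤ n)
    (hT : ∀ m : Nat, m ≤ m0 → ∀ lo : Nat, lo + m ≤ n →
      (T.getD m []).getD lo (0, 0) = ((pvS m (w.drop lo)).1 % pvMM, (pvS m (w.drop lo)).2 % pvMM))
    (lo : Nat) (hlo : lo + (m0 + 1) ≤ n) :
    pvCell w (pvCnt n) T (m0 + 1) lo
      = ((pvS (m0 + 1) (w.drop lo)).1 % pvMM, (pvS (m0 + 1) (w.drop lo)).2 % pvMM) := by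
  have hfun : (fun (p : Int × Int) (j : Nat) =>
      (PySem.Int.mod (p.1 + (pvCnt n).getD j 0 * (pvCnt n).getD (m0 + 1 - 1 - j) 0 * w.getD (lo + j) 0
          + ((T.getD j []).getD lo ((0 : Int), (0 : Int))).2 * (pvCnt n).getD (m0 + 1 - 1 - j) 0
          + ((T.getD (m0 + 1 - 1 - j) []).getD (lo + j + 1) ((0 : Int), (0 : Int))).2 * (pvCnt n).getD j 0) (10 ^ 9 + 9),
       PySem.Int.mod (p.2 + ((T.getD j []).getD lo ((0 : Int), (0 : Int))).1 * (pvCnt n).getD (m0 + 1 - 1 - j) 0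
          + ((T.getD (m0 + 1 - 1 - j) []).getD (lo + j + 1) ((0 : Int), (0 : Int))).1 * (pvCnt n).getD j 0) (10 ^ 9 + 9)))
      = (fun (p : Int × Int) (j : Nat) =>
      (PySem.Int.mod (p.1 + ((pvCnt n).getD j 0 * (pvCnt n).getD (m0 + 1 - 1 - j) 0 * w.getD (lo + j) 0
          + ((T.getD j []).getD lo ((0 : Int), (0 : Int))).2 * (pvCnt n).getD (m0 + 1 - 1 - j) 0
          + ((T.getD (m0 + 1 - 1 - j) []).getD (lo + j + 1) ((0 : Int), (0 : Int))).2 * (pvCnt n).getD j 0)) (10 ^ 9 + 9),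
       PySem.Int.mod (p.2 + (((T.getD j []).getD lo ((0 : Int), (0 : Int))).1 * (pvCnt n).getD (m0 + 1 - 1 - j) 0
          + ((T.getD (m0 + 1 - 1 - j) []).getD (lo + j + 1) ((0 : Int), (0 : Int))).1 * (pvCnt n).getD j 0)) (10 ^ 9 + 9))) := by
    funext p j
    simp only [add_assoc]
  rw [pvCell, hfun, pv_foldmod]
  have hterm : ∀ j, j < m0 + 1 →
      ((pvCnt n).getD j 0 * (pvCnt n).getD (m0 + 1 - 1 - j) 0 * w.getD (lo + j) 0
        + ((T.getD j []).getD lo ((0 : Int), (0 : Int))).2 * (pvCnt n).getD (m0 + 1 - 1 - j) 0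
        + ((T.getD (m0 + 1 - 1 - j) []).getD (lo + j + 1) ((0 : Int), (0 : Int))).2 * (pvCnt n).getD j 0
          ≡ pvTermE m0 j (w.drop lo) [ZMOD pvMM])
      ∧ (((T.getD j []).getD lo ((0 : Int), (0 : Int))).1 * (pvCnt n).getD (m0 + 1 - 1 - j) 0
        + ((T.getD (m0 + 1 - 1 - j) []).getD (lo + j + 1) ((0 : Int), (0 : Int))).1 * (pvCnt n).getD j 0
          ≡ pvTermO m0 j (w.drop lo) [ZMOD pvMM]) := by
    intro j hj
    have hj' : j ≤ m0 := by omega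
    have hsub : m0 + 1 - 1 - j = m0 - j := by omega
    have hc1 : (pvCnt n).getD j 0 = pvC j := by
      rw [pvCnt_char]
      exact PySem.List.getD_map_range pvC (n + 1) j 0 (by omega)
    have hc2 : (pvCnt n).getD (m0 + 1 - 1 - j) 0 = pvC (m0 - j) := by
      rw [hsub, pvCnt_char]
      exact PySem.List.getD_map_range pvC (n + 1) (m0 - j) 0 (by omega)
    have hv1 : (T.getD j []).getD lo (0, 0)
        = ((pvS j (w.drop lo)).1 % pvMM, (pvS j (w.drop lo)).2 % pvMM) :=
      hT j hj' lo (by omega)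
    have hv2 : (T.getD (m0 + 1 - 1 - j) []).getD (lo + j + 1) (0, 0)
        = ((pvS (m0 - j) (w.drop (lo + j + 1))).1 % pvMM, (pvS (m0 - j) (w.drop (lo + j + 1))).2 % pvMM) := by
      rw [hsub]
      exact hT (m0 - j) (by omega) (lo + j + 1) (by omega)
    have hw : w.getD (lo + j) 0 = (w.drop lo).getD j 0 := (pv_getD_drop w lo j).symm
    have hd : w.drop (lo + j + 1) = (w.drop lo).drop (j + 1) := (pv_drop_drop w lo j).symm
    rw [hc1, hc2, hv1, hv2, hw, hd]
    unfold pvTermE pvTermO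
    constructor
    · exact ((Int.ModEq.refl _).add (((pv_emod_modeq _).mul_right _))).add
        ((pv_emod_modeq _).mul_right _)
    · exact ((pv_emod_modeq _).mul_right _).add ((pv_emod_modeq _).mul_right _)

  refine Prod.ext ?_ ?_
  · refine (pv_sum_modeq _ _ _ (fun j hjm => (hterm j (List.mem_range.mp hjm)).1)).trans ?_
    rw [pvS_succ]
  · refine (pv_sum_modeq _ _ _ (fun j hjm => (hterm j (List.mem_range.mp hjm)).2)).trans ?_
    rw [pvS_succ]

theorem pvEo_char (w : List Int) (n : Nat) : ∀ m0 : Nat, m0 ≤ n →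
    ((List.range m0).foldl (pvEoStep w n (pvCnt n)) [List.replicate (n + 1) ((0 : Int), (0 : Int))]).length = m0 + 1
    ∧ (∀ m : Nat, m ≤ m0 →
        (((List.range m0).foldl (pvEoStep w n (pvCnt n)) [List.replicate (n + 1) ((0 : Int), (0 : Int))]).getD m []).length = n - m + 1
        ∧ ∀ lo : Nat, lo + m ≤ n →
            (((List.range m0).foldl (pvEoStep w n (pvCnt n)) [List.replicate (n + 1) ((0 : Int), (0 : Int))]).getD m []).getD lo (0, 0)
              = ((pvS m (w.drop lo)).1 % pvMM, (pvS m (w.drop lo)).2 % pvMM)) := by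
  intro m0
  induction m0 with
  | zero =>
    intro _
    simp only [List.range_zero, List.foldl_nil]
    refine ⟨by simp, ?_⟩
    intro m hm
    interval_cases m
    refine ⟨by simp, ?_⟩
    intro lo hlo
    have : (List.replicate (n + 1) ((0 : Int), (0 : Int))).getD lo (0, 0) = (0, 0) := by
      rw [List.getD_eq_getElem?_getD, List.getElem?_replicate]
      simp [show lo < n + 1 by omega]
    simp only [List.getD_cons_zero, this]
    rw [show pvS 0 (w.drop lo) = (0, 0) by simp [pvS]]
    simp
  | succ m0 ih =>
    intro hm1
    obtain ⟨hlenT, hrow⟩ := ih (by omega)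
    set T := (List.range m0).foldl (pvEoStep w n (pvCnt n)) [List.replicate (n + 1) ((0 : Int), (0 : Int))] with hT
    have hsplit : (List.range (m0 + 1)).foldl (pvEoStep w n (pvCnt n)) [List.replicate (n + 1) ((0 : Int), (0 : Int))]
        = pvEoStep w n (pvCnt n) T m0 := by
      rw [List.range_succ, List.foldl_append, List.foldl_cons, List.foldl_nil]
    have hrowmap : (List.range (n - (m0 + 1) + 1)).foldl
        (fun (row : List (Int × Int)) lo => row ++ [pvCell w (pvCnt n) T (m0 + 1) lo]) []
        = (List.range (n - (m0 + 1) + 1)).map (fun lo => pvCell w (pvCnt n) T (m0 + 1) lo) := by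
      rw [PySem.List.foldl_append_singleton_eq_map]
      simp
    rw [hsplit, pvEoStep, hrowmap]
    refine ⟨by simp [hlenT], ?_⟩
    intro m hm
    rcases Nat.lt_or_ge m (m0 + 1) with hlt | hge
    · have hgd : (T ++ [(List.range (n - (m0 + 1) + 1)).map (fun lo => pvCell w (pvCnt n) T (m0 + 1) lo)]).getD m []
          = T.getD m [] := by
        rw [List.getD_eq_getElem?_getD, List.getElem?_append_left (by rw [hlenT]; omega),
          ← List.getD_eq_getElem?_getD]
      rw [hgd]
      exact hrow m (by omega)
    · have hmeq : m = m0 + 1 := by omega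
      subst hmeq
      have hgd : (T ++ [(List.range (n - (m0 + 1) + 1)).map (fun lo => pvCell w (pvCnt n) T (m0 + 1) lo)]).getD (m0 + 1) []
          = (List.range (n - (m0 + 1) + 1)).map (fun lo => pvCell w (pvCnt n) T (m0 + 1) lo) := by
        rw [List.getD_eq_getElem?_getD, List.getElem?_append_right (by rw [hlenT])]
        simp [hlenT]
      rw [hgd]
      refine ⟨by simp, ?_⟩
      intro lo hlo
      rw [PySem.List.getD_map_range _ _ _ _ (by omega)]
      exact pvCell_char w n T m0 (by omega) (fun m hmm lo' hlo' => (hrow m hmm).2 lo' hlo') lo hlo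

def pvFinal (d : PySem.Dict Int (Int × Int)) (l : List Int) : Int × Int :=
  d.items.foldl (fun (eo : Int × Int) kv =>
    (eo.1 + PySem.Int.mod (kv.2.1 * pvWt l kv.1) (10 ^ 9 + 9),
     eo.2 + PySem.Int.mod (kv.2.2 * pvWt l kv.1) (10 ^ 9 + 9))) (0, 0)

theorem pvA_decomp (N alpha beta : Int) (A : List Int) :
    calculate_bst_liking N alpha beta A =
      (let st := pvTab N
       let d := (PySem.List.pyGet? st.2 N).getD PySem.Dict.empty
       let l := PySem.List.sorted A (fun x => x) false
       let eo := pvFinal d l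
       let e := PySem.Int.mod eo.1 (10 ^ 9 + 9)
       let o := PySem.Int.mod eo.2 (10 ^ 9 + 9)
       PySem.Int.mod (PySem.Int.mod (e * alpha) (10 ^ 9 + 9) + ((10 ^ 9 + 9) - PySem.Int.mod (o * beta) (10 ^ 9 + 9))) (10 ^ 9 + 9)) := rfl

theorem pvFinal_char (d : PySem.Dict Int (Int × Int)) (l : List Int) :
    pvFinal d l = ((d.items.map (fun kv => PySem.Int.mod (kv.2.1 * pvWt l kv.1) (10 ^ 9 + 9))).sum,
                   (d.items.map (fun kv => PySem.Int.mod (kv.2.2 * pvWt l kv.1) (10 ^ 9 + 9))).sum) := by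
  rw [pvFinal]
  have := pv_pairfold d.items (0, 0)
    (fun kv => PySem.Int.mod (kv.2.1 * pvWt l kv.1) (10 ^ 9 + 9))
    (fun kv => PySem.Int.mod (kv.2.2 * pvWt l kv.1) (10 ^ 9 + 9))
  simpa using this

theorem pvB_decomp (N alpha beta : Int) (A : List Int) :
    calculate_bst_liking_alt N alpha beta A =
      (let w := PySem.List.slice (PySem.List.sorted A (fun x => x) false) none (some (max N 0))
       let p := ((pvEoTab w w.length (pvCnt w.length)).getD w.length []).getD 0 ((0 : Int), (0 : Int))
       PySem.Int.mod (PySem.Int.mod (p.1 * alpha) (10 ^ 9 + 9)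
         + ((10 ^ 9 + 9) - PySem.Int.mod (p.2 * beta) (10 ^ 9 + 9))) (10 ^ 9 + 9)) := rfl

theorem pv_main (N alpha beta : Int) (A : List Int) (hN0 : 0 ≤ N) (hNlen : N ≤ A.length) :
    calculate_bst_liking N alpha beta A = calculate_bst_liking_alt N alpha beta A := by
  have hNcast : ((N.toNat : Int)) = N := Int.toNat_of_nonneg hN0
  set l := PySem.List.sorted A (fun x => x) false with hl
  set n' := N.toNat with hn'
  have hlenl : l.length = A.length := PySem.List.length_sorted A _ _
  have hn'le : n' ≤ l.length := by
    have : (n' : Int) ≤ (l.length : Int) := by rw [hNcast, hlenl]; exact hNlen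
    exact_mod_cast this
  have hw : PySem.List.slice l none (some (max N 0)) = l.take n' := by
    rw [max_eq_left hN0]
    exact PySem.List.slice_to l hN0
  have hwlen : (l.take n').length = n' := by rw [List.length_take]; omega
  rw [pvA_decomp, pvB_decomp]
  simp only [← hl]
  simp only [hw, hwlen]
  simp only [← hNcast]
  obtain ⟨hbt, hlen2, hdp⟩ := pvTab_char n'
  have hdict : (PySem.List.pyGet? (pvTab ↑n').2 ↑n').getD PySem.Dict.empty
      = (pvTab ↑n').2.getD n' PySem.Dict.empty := by
    simp [PySem.List.pyGet?_natCast, List.getD_eq_getElem?_getD]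
  obtain ⟨hnd, hnn, hphi⟩ := hdp n' le_rfl
  have h3 : pvS n' l = pvS n' (l.take n') := by
    refine pvS_congr n' l (l.take n') (fun k hk => ?_)
    rw [List.getD_eq_getElem?_getD, List.getD_eq_getElem?_getD, List.getElem?_take]
    simp [show k < n' by omega]
  have hfc := pvFinal_char ((pvTab ↑n').2.getD n' PySem.Dict.empty) l
  have hsumE : ((((pvTab ↑n').2.getD n' PySem.Dict.empty).items.map
      (fun kv => PySem.Int.mod (kv.2.1 * pvWt l kv.1) (10 ^ 9 + 9))).sum)
      ≡ (pvS n' l).1 [ZMOD pvMM] := by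
    refine (pv_sum_modeq _ _ _ (fun kv _ => ?_)).trans (hphi l).1
    rw [pvmod]
    exact pv_emod_modeq _
  have hsumO : ((((pvTab ↑n').2.getD n' PySem.Dict.empty).items.map
      (fun kv => PySem.Int.mod (kv.2.2 * pvWt l kv.1) (10 ^ 9 + 9))).sum)
      ≡ (pvS n' l).2 [ZMOD pvMM] := by
    refine (pv_sum_modeq _ _ _ (fun kv _ => ?_)).trans (hphi l).2
    rw [pvmod]
    exact pv_emod_modeq _
  have heE : (pvFinal ((pvTab ↑n').2.getD n' PySem.Dict.empty) l).1 % pvMM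
      = (pvS n' (l.take n')).1 % pvMM := by
    rw [hfc, ← h3]
    exact hsumE
  have heO : (pvFinal ((pvTab ↑n').2.getD n' PySem.Dict.empty) l).2 % pvMM
      = (pvS n' (l.take n')).2 % pvMM := by
    rw [hfc, ← h3]
    exact hsumO
  obtain ⟨hlen3, hrow⟩ := pvEo_char (l.take n') n' n' le_rfl
  have hp : ((pvEoTab (l.take n') n' (pvCnt n')).getD n' []).getD 0 (0, 0)
      = ((pvS n' (l.take n')).1 % pvMM, (pvS n' (l.take n')).2 % pvMM) := by
    rw [pvEoTab]
    have := (hrow n' le_rfl).2 0 (by omega)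
    simpa using this
  rw [hdict, hp]
  simp only [pvmod, heE, heO]

theorem pv_main_neg (alpha beta : Int) (A : List Int) :
    calculate_bst_liking (-1) alpha beta A = calculate_bst_liking_alt (-1) alpha beta A := by
  rw [pvA_decomp, pvB_decomp]
  have htab : pvTab (-1) = ([1], [PySem.Dict.empty]) := by
    rw [pvTab, PySem.List.pyRange_one_eq_nil (by norm_num)]
    rfl
  have hA : (PySem.List.pyGet? (pvTab (-1)).2 (-1)).getD PySem.Dict.empty
      = (PySem.Dict.empty : PySem.Dict Int (Int × Int)) := by
    rw [htab]
    rfl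
  have hfin : pvFinal PySem.Dict.empty (PySem.List.sorted A (fun x => x) false) = (0, 0) := by
    rw [pvFinal]
    rfl
  have hsl : PySem.List.slice (PySem.List.sorted A (fun x => x) false) none (some (max (-1) 0))
      = [] := by
    rw [show max (-1 : Int) 0 = ((0 : Nat) : Int) by norm_num, PySem.List.slice_to_natCast]
    simp
  simp only [hA, hfin, hsl]
  norm_num [pvEoTab, pvmod, pvMM]

-- ===== VERDICT (by name: the statement is the Claim_ definition above) =====
theorem calculate_bst_liking_spec : Claim_equal_calculate_bst_liking := by
  intro N alpha beta A hdom hpre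
  rcases hpre with ⟨h0, hlen⟩ | hneg
  · exact pv_main N alpha beta A h0 hlen
  · subst hneg
    exact pv_main_neg alpha beta A
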